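-- pv_equiv track=rewrite | github.com/kreeuwijk/omniverse-dsx-blueprint-for-ai-factories | deps/kit-usd-agents/source/modules/lc_agent/src/lc_agent/utils/multi_agent_utils.py | _find_action_at_line_start
-- ===== SOURCE A (Python) =====
-- from typing import Optional, Tuple, List, Dict
--
-- def _line_starts_with_action(line: str, valid_actions: List[str]) -> Optional[str]:
--     """
--     Checks if a line starts with a valid action.
--
--     Returns the matched action name if found, None otherwise.
--     """
--     stripped = line.strip()
--     if not stripped:
--         return None
--
--     for action in valid_actions:
--         if not stripped.upper().startswith(action.upper()):
--             continue
--
--         # Ensure it's a complete word (followed by space or end of line)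
--         remainder = stripped[len(action):]
--         if remainder and not remainder[0].isspace():
--             continue
--
--         return action
--
--     return None
--
-- def _find_action_at_line_start(text: str, route_nodes: List[str]) -> Tuple[Optional[str], Optional[str]]:
--     """
--     Finds the first line that starts with a valid action (FINAL or a route node).
--
--     Content includes all text after the action until the next action is found.
--
--     Examples:
--         Input: "Now I understand\n\nKitInfo What is the user name?\nCheck the tools\nKitInfo What is the address"
--         Output: ("KitInfo", "What is the user name?\nCheck the tools")
--
--         Input: "The user said Victor\nFINAL Victor"
--         Output: ("FINAL", "Victor")
--
--     Args:
--         text: The text to search.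
--         route_nodes: List of valid route node names.
--
--     Returns:
--         Tuple of (action, content) where:
--         - action: The matched action name (original case for routes, "FINAL" for final)
--         - content: Text after the action up to the next action, or None if empty
--     """
--     valid_actions = ["FINAL"] + list(route_nodes)
--     lines = text.split("\n")
--
--     # Find the first line with a valid action
--     first_action = None
--     first_action_line_idx = None
--     first_line_content = None
--
--     for i, line in enumerate(lines):
--         action = _line_starts_with_action(line, valid_actions)
--         if action:
--             first_action = action
--             first_action_line_idx = i
--             # Extract content after the action on this line
--             first_line_content = line.strip()[len(action):].strip()
--             break
--
--     if first_action is None: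
--         return (None, None)
--
--     # Collect content lines until the next action
--     content_parts = []
--     if first_line_content:
--         content_parts.append(first_line_content)
--
--     for i in range(first_action_line_idx + 1, len(lines)):
--         line = lines[i]
--         # Stop if this line starts with another action
--         if _line_starts_with_action(line, valid_actions):
--             break
--         content_parts.append(line.strip())
--
--     # Join and clean up the content
--     content = "\n".join(content_parts).strip() or None
--
--     return (first_action, content)
-- ===== SOURCE B (Python) =====
-- from typing import Optional, Tuple, List
--
--
-- def _line_starts_with_action(line: str, valid_actions: List[str]) -> Optional[str]:
--     stripped = line.strip()
--     if not stripped: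
--         return None
--     for action in valid_actions:
--         if not stripped.upper().startswith(action.upper()):
--             continue
--         remainder = stripped[len(action):]
--         if remainder and not remainder[0].isspace():
--             continue
--         return action
--     return None
--
--
-- def _find_action_at_line_start(text: str, route_nodes: List[str]) -> Tuple[Optional[str], Optional[str]]:
--     valid_actions = ["FINAL"] + list(route_nodes)
--     lines = text.split("\n")
--
--     # One pass: index table of every line that starts with an action.
--     hits = [(i, a) for i, line in enumerate(lines)
--             if (a := _line_starts_with_action(line, valid_actions))]
--     if not hits:
--         return (None, None)
--
--     start, action = hits[0]
--     stop = hits[1][0] if len(hits) > 1 else len(lines)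
--
--     parts = []
--     head = lines[start].strip()[len(action):].strip()
--     if head:
--         parts.append(head)
--     parts += [line.strip() for line in lines[start + 1:stop]]
--
--     content = "\n".join(parts).strip() or None
--     return (action, content)
-- ===== Notes on version B (the rewrite author's own statement) =====
-- stated objective: alternative
-- what changed: Replaces A's find-first-then-collect-until-break pair of loops by a single enumerate pass that builds an index table of all action lines, then takes the answer as hits[0] and slices the content lines up to hits[1] (or end of text).
import Mathlib
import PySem

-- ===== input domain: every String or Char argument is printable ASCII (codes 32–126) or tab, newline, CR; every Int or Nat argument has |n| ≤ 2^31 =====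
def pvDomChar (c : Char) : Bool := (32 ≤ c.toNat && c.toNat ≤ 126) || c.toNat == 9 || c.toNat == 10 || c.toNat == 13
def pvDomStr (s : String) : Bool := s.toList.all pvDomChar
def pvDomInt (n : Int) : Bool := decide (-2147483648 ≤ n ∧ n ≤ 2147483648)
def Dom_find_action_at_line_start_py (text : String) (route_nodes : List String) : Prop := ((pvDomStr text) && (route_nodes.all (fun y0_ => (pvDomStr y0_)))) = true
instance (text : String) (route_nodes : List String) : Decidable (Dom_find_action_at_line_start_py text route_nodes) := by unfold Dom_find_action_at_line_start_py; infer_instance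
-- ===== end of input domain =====

-- B replaces A's find-first loop + collect-until-break loop by one enumerate pass building an
-- index table of all action lines, then reads hits[0]/hits[1] and slices the content lines
-- (objective: alternative decomposition, same cost).

-- ===== PORT A =====

-- shared helper: port of _line_starts_with_action's `for action in valid_actions` loop
-- (stripped is nonempty here); branches in source order
def pvLswaGo (stripped : List Char) : List String → Option String
  | [] => none
  | action :: rest =>
    if !(PySem.Chars.startswith (PySem.Chars.upper stripped) (PySem.Chars.upper action.toList)) then
      pvLswaGo stripped rest
    else
      -- remainder = stripped[len(action):]  (nonnegative index: plain drop)
      match stripped.drop action.toList.length with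
      | [] => some action
      | c :: _ => if !(PySem.Chars.isspace c) then pvLswaGo stripped rest else some action

-- port of _line_starts_with_action (the helper both Pythons call)
def pvLineStartsWithAction (line : List Char) (valid_actions : List String) : Option String :=
  let stripped := PySem.Chars.strip line
  if stripped = [] then none
  else pvLswaGo stripped valid_actions

-- Python truthiness of the Optional[str] result (`if action:` — None and "" are falsy)
def pvTruthy : Option String → Bool
  | none => false
  | some a => !(a.toList = [])

-- A's first loop: `for i, line in enumerate(lines)` with break on a truthy action;
-- returns (action, line index). The enumerate counter is always ≥ 0: Nat.
def pvFindFirst (valid_actions : List String) : List (List Char) → Nat → Option (String × Nat)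
  | [], _ => none
  | line :: rest, i =>
    match pvLineStartsWithAction line valid_actions with
    | some a => if a.toList = [] then pvFindFirst valid_actions rest (i + 1) else some (a, i)
    | none => pvFindFirst valid_actions rest (i + 1)

-- A's second loop: `for i in range(idx+1, len(lines))` reading lines[i] in order with break =
-- structural recursion over the suffix lines[idx+1:]
def pvCollectA (valid_actions : List String) : List (List Char) → List (List Char)
  | [] => []
  | line :: rest =>
    if pvTruthy (pvLineStartsWithAction line valid_actions) then []
    else PySem.Chars.strip line :: pvCollectA valid_actions rest

def find_action_at_line_start_py (text : String) (route_nodes : List String) : Option String × Option String :=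
  let valid_actions := "FINAL" :: route_nodes
  let lines := PySem.Chars.splitOn text.toList ['\n']
  match pvFindFirst valid_actions lines 0 with
  | none => (none, none)
  | some (first_action, idx) =>
    -- first_line_content = line.strip()[len(action):].strip()  (the matched line is lines[idx])
    let first_line_content :=
      PySem.Chars.strip ((PySem.Chars.strip (lines.getD idx [])).drop first_action.toList.length)
    let content_parts :=
      (if first_line_content = [] then [] else [first_line_content]) ++
        pvCollectA valid_actions (lines.drop (idx + 1))
    let content := PySem.Chars.strip (PySem.Chars.join ['\n'] content_parts)
    (some first_action, if content = [] then none else some (String.ofList content))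

-- ===== PORT B =====

-- B's one pass: the comprehension over enumerate(lines) keeping (i, action) for truthy actions
-- (enumerate indices are ≥ 0: Nat counter)
def pvHitsB (valid_actions : List String) : List (List Char) → Nat → List (Nat × String)
  | [], _ => []
  | line :: rest, i =>
    match pvLineStartsWithAction line valid_actions with
    | some a =>
      if a.toList = [] then pvHitsB valid_actions rest (i + 1)
      else (i, a) :: pvHitsB valid_actions rest (i + 1)
    | none => pvHitsB valid_actions rest (i + 1)

def find_action_at_line_start_py_alt (text : String) (route_nodes : List String) : Option String × Option String :=
  let valid_actions := "FINAL" :: route_nodes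
  let lines := PySem.Chars.splitOn text.toList ['\n']
  match pvHitsB valid_actions lines 0 with
  | [] => (none, none)
  | (start, action) :: restHits =>
    let stop := match restHits with
      | (j, _) :: _ => j
      | [] => lines.length
    let head :=
      PySem.Chars.strip ((PySem.Chars.strip (lines.getD start [])).drop action.toList.length)
    -- lines[start+1:stop]  (0 ≤ start+1 and stop ≥ start+1 here: plain drop/take)
    let parts :=
      (if head = [] then [] else [head]) ++
        ((lines.drop (start + 1)).take (stop - (start + 1))).map PySem.Chars.strip
    let content := PySem.Chars.strip (PySem.Chars.join ['\n'] parts)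
    (some action, if content = [] then none else some (String.ofList content))

-- ===== PRECONDITION & SPEC =====
def Spec_find_action_at_line_start_py (text : String) (route_nodes : List String) (out : Option String × Option String) : Prop := out = find_action_at_line_start_py_alt text route_nodes
instance (text : String) (route_nodes : List String) (out : Option String × Option String) : Decidable (Spec_find_action_at_line_start_py text route_nodes out) := by unfold Spec_find_action_at_line_start_py; infer_instance

-- ===== CLAIM (what is proved, stated in full; the proofs are below) =====
def Claim_equal_find_action_at_line_start_py : Prop := ∀ (text : String) (route_nodes : List String), Dom_find_action_at_line_start_py text route_nodes → Spec_find_action_at_line_start_py text route_nodes (find_action_at_line_start_py text route_nodes)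

-- ===== LEMMAS AND PROOFS =====

-- the "truthy match" of a line, the value both loops' branching is determined by
def pvM (va : List String) (line : List Char) : Option String :=
  match pvLineStartsWithAction line va with
  | some a => if a.toList = [] then none else some a
  | none => none

-- the stop index B reads off a hit list (head's index, else the default)
def pvStop (hits : List (Nat × String)) (dflt : Nat) : Nat :=
  match hits with
  | (j, _) :: _ => j
  | [] => dflt

theorem pvTruthy_eq_isSome (va : List String) (l : List Char) :
    pvTruthy (pvLineStartsWithAction l va) = (pvM va l).isSome := by
  unfold pvTruthy pvM
  cases pvLineStartsWithAction l va with
  | none => rfl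
  | some a => by_cases h : a.toList = [] <;> simp [h]

theorem pvHitsB_cons (va : List String) (l : List Char) (t : List (List Char)) (i : Nat) :
    pvHitsB va (l :: t) i =
      match pvM va l with
      | some a => (i, a) :: pvHitsB va t (i + 1)
      | none => pvHitsB va t (i + 1) := by
  simp only [pvHitsB, pvM]
  cases pvLineStartsWithAction l va with
  | none => rfl
  | some a => by_cases h : a.toList = [] <;> simp [h]

theorem pvFindFirst_cons (va : List String) (l : List Char) (t : List (List Char)) (i : Nat) :
    pvFindFirst va (l :: t) i =
      match pvM va l with
      | some a => some (a, i)
      | none => pvFindFirst va t (i + 1) := by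
  simp only [pvFindFirst, pvM]
  cases pvLineStartsWithAction l va with
  | none => rfl
  | some a => by_cases h : a.toList = [] <;> simp [h]

theorem pvStop_ge (va : List String) (ys : List (List Char)) (i : Nat) :
    i ≤ pvStop (pvHitsB va ys i) (i + ys.length) := by
  induction ys generalizing i with
  | nil => simp [pvHitsB, pvStop]
  | cons l t ih =>
    rw [pvHitsB_cons]
    cases hm : pvM va l with
    | some a => simp [pvStop]
    | none =>
      simp only [List.length_cons]
      have e : i + (t.length + 1) = (i + 1) + t.length := by omega
      rw [e]
      exact le_trans (by omega) (ih (i + 1))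

theorem pvCollectA_eq_take (va : List String) (ys : List (List Char)) (i : Nat) :
    pvCollectA va ys =
      (ys.take (pvStop (pvHitsB va ys i) (i + ys.length) - i)).map PySem.Chars.strip := by
  induction ys generalizing i with
  | nil => simp [pvCollectA, pvHitsB, pvStop]
  | cons l t ih =>
    rw [pvHitsB_cons]
    cases hm : pvM va l with
    | some a =>
      have ht : pvTruthy (pvLineStartsWithAction l va) = true := by
        rw [pvTruthy_eq_isSome, hm]; rfl
      simp [pvCollectA, ht, pvStop]
    | none =>
      have ht : pvTruthy (pvLineStartsWithAction l va) = false := by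
        rw [pvTruthy_eq_isSome, hm]; rfl
      have e : i + (l :: t).length = (i + 1) + t.length := by simp; omega
      rw [e]
      have hge := pvStop_ge va t (i + 1)
      have e2 : pvStop (pvHitsB va t (i + 1)) ((i + 1) + t.length) - i =
          (pvStop (pvHitsB va t (i + 1)) ((i + 1) + t.length) - (i + 1)) + 1 := by omega
      rw [e2]
      simp only [pvCollectA, ht, Bool.false_eq_true, if_false, List.take_succ_cons, List.map_cons]
      rw [ih (i + 1)]

theorem pvFindFirst_hits (va : List String) (ys : List (List Char)) (i : Nat) :
    match pvFindFirst va ys i with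
    | none => pvHitsB va ys i = []
    | some (a, idx) =>
        i ≤ idx ∧ idx - i < ys.length ∧
        pvHitsB va ys i = (idx, a) :: pvHitsB va (ys.drop (idx - i + 1)) (idx + 1) := by
  induction ys generalizing i with
  | nil => simp [pvFindFirst, pvHitsB]
  | cons l t ih =>
    rw [pvFindFirst_cons]
    cases hm : pvM va l with
    | some a =>
      simp only []
      refine ⟨le_refl i, by simp, ?_⟩
      rw [pvHitsB_cons, hm]
      simp
    | none =>
      have h := ih (i + 1)
      cases hf : pvFindFirst va t (i + 1) with
      | none =>
        rw [hf] at h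
        simp only [pvHitsB_cons, hm]
        exact h
      | some p =>
        obtain ⟨a, idx⟩ := p
        rw [hf] at h
        obtain ⟨h1, h2, h3⟩ := h
        simp only []
        refine ⟨by omega, by simp; omega, ?_⟩
        rw [pvHitsB_cons, hm, h3]
        have e : idx - i + 1 = (idx - (i + 1) + 1) + 1 := by omega
        rw [e, List.drop_succ_cons]

-- ===== VERDICT (by name: the statement is the Claim_ definition above) =====
theorem find_action_at_line_start_py_spec : Claim_equal_find_action_at_line_start_py := by
  intro text route_nodes _
  unfold Spec_find_action_at_line_start_py
  unfold find_action_at_line_start_py find_action_at_line_start_py_alt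
  set va := "FINAL" :: route_nodes with hva
  set lines := PySem.Chars.splitOn text.toList ['\n'] with hlines
  have H := pvFindFirst_hits va lines 0
  cases hf : pvFindFirst va lines 0 with
  | none =>
    rw [hf] at H
    simp [hf, H]
  | some p =>
    obtain ⟨a, idx⟩ := p
    rw [hf] at H
    obtain ⟨-, h2, h3⟩ := H
    simp only [Nat.sub_zero] at h2 h3
    have hcoll : pvCollectA va (lines.drop (idx + 1)) =
        ((lines.drop (idx + 1)).take
          (pvStop (pvHitsB va (lines.drop (idx + 1)) (idx + 1)) lines.length - (idx + 1))).map
          PySem.Chars.strip := by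
      have := pvCollectA_eq_take va (lines.drop (idx + 1)) (idx + 1)
      rwa [List.length_drop, show (idx + 1) + (lines.length - (idx + 1)) = lines.length by omega] at this
    simp only [hf, h3, hcoll]
    cases hr : pvHitsB va (lines.drop (idx + 1)) (idx + 1) with
    | nil => simp [pvStop]
    | cons q rest => obtain ⟨j, b⟩ := q; simp [pvStop]
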